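-- pv_equiv track=rewrite | github.com/allan-debiaggio/budget_buddy | transaction_interface.py | validate_date
-- ===== SOURCE A (Python) =====
-- def validate_date(P):
--     # Allow empty field
--     if P == "":
--         return True
--
--     # Check if input matches DD/MM/YY pattern allowing incomplete input
--     if len(P) > 8:  # Max length for DD/MM/YY format
--         return False
--
--     parts = P.split('/')
--
--     if len(parts) > 3:  # Max 3 parts (DD/MM/YY)
--         return False
--
--     for part in parts:
--         if not (part.isdigit() or part == ''):
--             return False
--
--         if len(part) > 2:  # Each part should be max 2 digits
--             return False
--
--     # If we have a complete date, validate the values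
--     if len(parts) == 3 and all(parts):
--         try:
--             day, month, year = map(int, parts)
--             # Validate day
--             if not (1 <= day <= 31):
--                 return False
--             # Validate month
--             if not (1 <= month <= 12):
--                 return False
--             # Validate year
--             if not (0 <= year <= 99):
--                 return False
--             return True
--         except ValueError:
--             return False
--
--     return True
-- ===== SOURCE B (Python) =====
-- def validate_date(P):
--     # Single left-to-right scan (state machine) instead of split + per-part loops.
--     if P == "":
--         return True
--     if len(P) > 8:
--         return False
--     done = []      # completed fields as (value, length)
--     v = 0          # value of the current field
--     l = 0          # length of the current field
--     for c in P:
--         if c == '/':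
--             if len(done) == 2:
--                 return False
--             done.append((v, l))
--             v = 0
--             l = 0
--         elif '0' <= c <= '9':
--             if l == 2:
--                 return False
--             v = v * 10 + (ord(c) - 48)
--             l += 1
--         else:
--             return False
--     if len(done) == 2 and l > 0 and all(fl > 0 for _, fl in done):
--         d = done[0][0]
--         m = done[1][0]
--         return (1 <= d <= 31) and (1 <= m <= 12) and (0 <= v <= 99)
--     return True
-- ===== Notes on version B (the rewrite author's own statement) =====
-- stated objective: alternative
-- what changed: A splits the string on the separator and then validates each part in separate passes (digit check, length check, int() reparse); B makes a single left-to-right scan with a small state machine that counts fields, tracks the current field's length and accumulates its numeric value on the fly, applying the range checks to the accumulated values at the end.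
import Mathlib
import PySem

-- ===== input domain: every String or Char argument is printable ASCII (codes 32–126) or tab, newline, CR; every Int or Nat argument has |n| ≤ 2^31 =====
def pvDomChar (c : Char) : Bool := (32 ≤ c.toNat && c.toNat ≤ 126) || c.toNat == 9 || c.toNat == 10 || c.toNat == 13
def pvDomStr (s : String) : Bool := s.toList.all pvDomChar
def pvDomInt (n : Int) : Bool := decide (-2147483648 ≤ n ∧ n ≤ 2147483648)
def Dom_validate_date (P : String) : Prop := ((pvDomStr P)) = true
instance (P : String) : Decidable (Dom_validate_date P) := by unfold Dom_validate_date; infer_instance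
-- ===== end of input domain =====

-- B replaces A's split-then-per-part validation by a single left-to-right state-machine scan
-- over the characters (objective: alternative; same asymptotic cost).

-- ===== PORT A =====
-- A's 'for part in parts' loop with its two early returns
def vdCheckParts : List (List Char) → Bool
  | [] => true
  | part :: rest =>
    if ¬ (PySem.Chars.strIsdigit part || part = []) then false
    else if part.length > 2 then false
    else vdCheckParts rest


def validate_date (P : String) : Bool :=
  if P = "" then true
  else if PySem.Str.len P > 8 then false
  else
    let parts := PySem.Chars.splitOn P.toList ['/']
    if parts.length > 3 then false
    else if ¬ vdCheckParts parts then false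
    else if parts.length = 3 ∧ parts.all (fun p => ¬ p.isEmpty) then
      match parts with
      | [p0, p1, p2] =>
        match PySem.Int.ofChars? p0, PySem.Int.ofChars? p1, PySem.Int.ofChars? p2 with
        | some day, some month, some year =>
          if ¬ (1 ≤ day ∧ day ≤ 31) then false
          else if ¬ (1 ≤ month ∧ month ≤ 12) then false
          else if ¬ (0 ≤ year ∧ year ≤ 99) then false
          else true
        | _, _, _ => false
      | _ => true
    else true


-- ===== PORT B =====
-- Source B's scan state: 'done' = completed fields (value, length), (v, l) = current field
def vdLoop : List Char → List (Int × Nat) → Int → Nat → Option (List (Int × Nat) × Int × Nat)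
  | [], done, v, l => some (done, v, l)
  | c :: rest, done, v, l =>
    if c = '/' then
      if done.length = 2 then none
      else vdLoop rest (done ++ [(v, l)]) 0 0
    else if '0' ≤ c ∧ c ≤ '9' then
      if l = 2 then none
      else vdLoop rest done (v * 10 + ((c.toNat : Int) - 48)) (l + 1)
    else none


def validate_date_alt (P : String) : Bool :=
  if P = "" then true
  else if PySem.Str.len P > 8 then false
  else
    (vdLoop P.toList [] 0 0).elim false (fun st =>
      let done := st.1
      let v := st.2.1
      let l := st.2.2
      if done.length = 2 ∧ 0 < l ∧ done.all (fun f => 0 < f.2) then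
        -- done[0][0], done[1][0]: in range, since done.length = 2 in this branch
        decide ((1 ≤ (done.getD 0 (0, 0)).1 ∧ (done.getD 0 (0, 0)).1 ≤ 31) ∧
                (1 ≤ (done.getD 1 (0, 0)).1 ∧ (done.getD 1 (0, 0)).1 ≤ 12) ∧
                (0 ≤ v ∧ v ≤ 99))
      else true)

-- ===== PRECONDITION & SPEC =====
def Spec_validate_date (P : String) (out : Bool) : Prop := out = validate_date_alt P
instance (P : String) (out : Bool) : Decidable (Spec_validate_date P out) := by unfold Spec_validate_date; infer_instance

-- ===== CLAIM (what is proved, stated in full; the proofs are below) =====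
def Claim_equal_validate_date : Prop := ∀ (P : String), Dom_validate_date P → Spec_validate_date P (validate_date P)

-- ===== LEMMAS AND PROOFS =====

-- simple structural form of s.split('/'): (first piece, remaining pieces)
def splitS : List Char → List Char × List (List Char)
  | [] => ([], [])
  | c :: cs =>
    let p := splitS cs
    if c = '/' then ([], p.1 :: p.2) else (c :: p.1, p.2)


lemma go_eq : ∀ (fuel : Nat) (l cur : List Char) (acc : List (List Char)),
    l.length < fuel →
    PySem.Chars.splitOn.go ['/'] fuel l cur acc
      = acc.reverse ++ (cur.reverse ++ (splitS l).1) :: (splitS l).2 := by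
  intro fuel
  induction fuel with
  | zero => intro l cur acc h; omega
  | succ f ih =>
    intro l cur acc h
    cases l with
    | nil => simp [PySem.Chars.splitOn.go, splitS]
    | cons c rest =>
      rw [PySem.Chars.splitOn.go]
      by_cases hc : c = '/'
      · subst hc
        simp only [List.isPrefixOf, BEq.rfl, Bool.and_eq_true, and_self, if_true, List.length_cons, List.drop_succ_cons, List.length_nil, List.drop_zero]
        rw [ih rest [] (cur.reverse :: acc) (by simp at h ⊢; omega)]
        simp [splitS]
      · have hp : (['/'].isPrefixOf (c :: rest)) = false := by
          simp [List.isPrefixOf]; exact fun h' => (hc h'.symm).elim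
        rw [hp]
        simp only [Bool.false_eq_true, if_false]
        rw [ih rest (c :: cur) acc (by simp at h ⊢; omega)]
        simp [splitS, hc]


lemma splitOn_eq_splitS (cs : List Char) :
    PySem.Chars.splitOn cs ['/'] = (splitS cs).1 :: (splitS cs).2 := by
  rw [PySem.Chars.splitOn, go_eq (cs.length + 1) cs [] [] (by omega)]
  simp


-- value of a digit field, Horner-style, continuing from v
def valFrom (v : Int) (p : List Char) : Int :=
  p.foldl (fun a c => a * 10 + ((c.toNat : Int) - 48)) v


lemma vdLoop_eq (cs : List Char) : ∀ (done : List (Int × Nat)) (v : Int) (l : Nat),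
    l ≤ 2 → done.length ≤ 2 →
    vdLoop cs done v l =
      (if ((splitS cs).1.all PySem.Chars.isdigit ∧ l + (splitS cs).1.length ≤ 2 ∧
           (splitS cs).2.all (fun p => p.all PySem.Chars.isdigit && decide (p.length ≤ 2)) ∧
           done.length + (splitS cs).2.length ≤ 2) then
         (let fs := (valFrom v (splitS cs).1, l + (splitS cs).1.length)
                      :: (splitS cs).2.map (fun p => (valFrom 0 p, p.length))
          some (done ++ fs.dropLast, fs.getLastD (0, 0)))
       else none) := by
  induction cs with
  | nil =>
    intro done v l hl hd
    simp [vdLoop, splitS, valFrom, hl, hd]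
  | cons c rest ih =>
    intro done v l hl hd
    by_cases hc : c = '/'
    · subst hc
      have e1 : vdLoop ('/'::rest) done v l
          = if done.length = 2 then none else vdLoop rest (done ++ [(v,l)]) 0 0 := by
        simp [vdLoop]
      have e2 : splitS ('/'::rest) = ([], (splitS rest).1 :: (splitS rest).2) := by
        simp [splitS]
      rw [e1, e2]
      by_cases hdl : done.length = 2
      · rw [if_pos hdl, if_neg]
        simp only [List.all_cons, List.length_cons]
        omega
      · rw [if_neg hdl, ih (done ++ [(v, l)]) 0 0 (by omega) (by simp; omega)]
        by_cases hcond : ((splitS rest).1.all PySem.Chars.isdigit ∧ 0 + (splitS rest).1.length ≤ 2 ∧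
            (splitS rest).2.all (fun p => p.all PySem.Chars.isdigit && decide (p.length ≤ 2)) ∧
            (done ++ [(v, l)]).length + (splitS rest).2.length ≤ 2)
        · rw [if_pos hcond, if_pos]
          · simp only [valFrom, List.foldl_nil, List.map_cons, List.length_nil, List.getLastD_cons,
              List.dropLast_cons_of_ne_nil (List.cons_ne_nil _ _), List.append_assoc, List.cons_append,
              List.nil_append, Nat.add_zero, Nat.zero_add]
          · simp only [List.all_nil, List.length_nil, List.all_cons, List.length_cons,
              Bool.and_eq_true, decide_eq_true_eq]
            simp only [List.length_append, List.length_singleton] at hcond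
            exact ⟨trivial, by omega, ⟨⟨hcond.1, by omega⟩, hcond.2.2.1⟩, by omega⟩
        · rw [if_neg hcond, if_neg]
          simp only [List.all_nil, List.length_nil, List.all_cons, List.length_cons,
            Bool.and_eq_true, decide_eq_true_eq] at *
          intro hK
          exact hcond ⟨hK.2.2.1.1.1, by omega, hK.2.2.1.2, by simp; omega⟩
    · have e2 : splitS (c::rest) = (c :: (splitS rest).1, (splitS rest).2) := by
        simp [splitS, hc]
      by_cases hdig : '0' ≤ c ∧ c ≤ '9'
      · have e1 : vdLoop (c::rest) done v l
            = if l = 2 then none else vdLoop rest done (v * 10 + ((c.toNat : Int) - 48)) (l + 1) := by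
          simp [vdLoop, hc, hdig]
        rw [e1, e2]
        by_cases hll : l = 2
        · rw [if_pos hll, if_neg]
          simp only [List.all_cons, List.length_cons]
          omega
        · rw [if_neg hll, ih done (v * 10 + ((c.toNat : Int) - 48)) (l+1) (by omega) hd]
          have hvf : valFrom (v * 10 + ((c.toNat : Int) - 48)) (splitS rest).1 = valFrom v (c :: (splitS rest).1) := by
            simp [valFrom]
          have hdc : PySem.Chars.isdigit c = true := by
            simp [PySem.Chars.isdigit, hdig.1, hdig.2]
          by_cases hcond : ((splitS rest).1.all PySem.Chars.isdigit ∧ (l+1) + (splitS rest).1.length ≤ 2 ∧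
              (splitS rest).2.all (fun p => p.all PySem.Chars.isdigit && decide (p.length ≤ 2)) ∧
              done.length + (splitS rest).2.length ≤ 2)
          · rw [if_pos hcond, if_pos]
            · rw [hvf]
              simp only [List.length_cons]
              have hn : l + 1 + (splitS rest).1.length = l + ((splitS rest).1.length + 1) := by omega
              rw [hn]
            · simp only [List.all_cons, List.length_cons, hdc]
              exact ⟨hcond.1, by omega, hcond.2.2.1, hcond.2.2.2⟩
          · rw [if_neg hcond, if_neg]
            simp only [List.all_cons, List.length_cons, Bool.and_eq_true] at *
            intro hK
            exact hcond ⟨hK.1.2, by omega, hK.2.2.1, hK.2.2.2⟩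
      · have e1 : vdLoop (c::rest) done v l = none := by
          simp [vdLoop, hc, hdig]
        rw [e1, e2, if_neg]
        simp only [List.all_cons, Bool.and_eq_true]
        intro hK
        have : PySem.Chars.isdigit c = true := hK.1.1
        simp [PySem.Chars.isdigit] at this
        exact hdig ⟨this.1, this.2⟩


lemma checkParts_eq (qs : List (List Char)) :
    vdCheckParts qs = qs.all (fun p => p.all PySem.Chars.isdigit && decide (p.length ≤ 2)) := by
  induction qs with
  | nil => rfl
  | cons p rest ih =>
    simp only [vdCheckParts, List.all_cons, PySem.Chars.strIsdigit]
    by_cases hp : p = []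
    · subst hp; simpa using ih
    · simp only [hp]
      by_cases hall : p.all PySem.Chars.isdigit = true
      · simp [hall, hp, ih]
        by_cases hl : p.length ≤ 2 <;> simp [hl]
      · simp [hall]


lemma digit_enum (c : Char) (h : PySem.Chars.isdigit c = true) :
    c ∈ (['0','1','2','3','4','5','6','7','8','9'] : List Char) := by
  simp only [PySem.Chars.isdigit, Bool.and_eq_true, decide_eq_true_eq] at h
  have h1 : 48 ≤ c.toNat := h.1
  have h2 : c.toNat ≤ 57 := h.2
  have hc : Char.ofNat c.toNat = c := Char.ofNat_toNat c
  interval_cases h3 : c.toNat <;> rw [← hc] <;> decide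


lemma ofChars_digits (p : List Char) (hne : p ≠ []) (hd : p.all PySem.Chars.isdigit = true)
    (hl : p.length ≤ 2) : PySem.Int.ofChars? p = some (valFrom 0 p) := by
  match p, hne with
  | [a], _ =>
    have ha := digit_enum a (by simpa using hd)
    fin_cases ha <;> decide
  | [a, b], _ =>
    simp only [List.all_cons, List.all_nil, Bool.and_eq_true] at hd
    have ha := digit_enum a hd.1
    have hb := digit_enum b hd.2.1
    fin_cases ha <;> fin_cases hb <;> decide
  | a :: b :: c :: t, _ => simp at hl


lemma validate_date_eq_alt (P : String) : validate_date P = validate_date_alt P := by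
  by_cases hP : P = ""
  · simp [validate_date, validate_date_alt, hP]
  · by_cases hlen : PySem.Str.len P > 8
    · rw [validate_date, validate_date_alt, if_neg hP, if_neg hP, if_pos hlen, if_pos hlen]
    · rw [validate_date, validate_date_alt, if_neg hP, if_neg hP, if_neg hlen, if_neg hlen]
      rw [vdLoop_eq P.toList [] 0 0 (by omega) (by simp)]
      simp only [splitOn_eq_splitS]
      generalize splitS P.toList = sp
      obtain ⟨p0, ps⟩ := sp
      by_cases hC : (p0.all PySem.Chars.isdigit = true ∧ 0 + p0.length ≤ 2 ∧
          (ps.all fun p => p.all PySem.Chars.isdigit && decide (p.length ≤ 2)) = true ∧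
          List.length ([] : List (Int × Nat)) + ps.length ≤ 2)
      · rw [if_pos hC]
        obtain ⟨hC1, hC2, hC3, hC4⟩ := hC
        rw [if_neg (by simp only [List.length_cons]; simp at hC4; omega)]
        rw [if_neg (by simp only [checkParts_eq, List.all_cons, Bool.and_eq_true, decide_eq_true_eq, not_not]; exact ⟨⟨hC1, by omega⟩, hC3⟩)]
        simp only [List.length_nil, Nat.zero_add] at hC4
        match ps, hC4 with
        | [], _ => simp
        | [p1], _ => simp
        | [p1, p2], _ =>
          simp only [List.all_cons, List.all_nil, Bool.and_eq_true, decide_eq_true_eq,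
            and_true] at hC3
          simp only [List.map_cons, List.map_nil,
            List.dropLast_cons_of_ne_nil (List.cons_ne_nil _ _), List.dropLast, List.getLastD,
            List.getLast, List.nil_append, List.length_cons, List.length_nil, Option.elim,
            List.getD_cons_zero, List.getD_cons_succ]
          by_cases hne : (p0 ≠ [] ∧ p1 ≠ [] ∧ p2 ≠ [])
          · rw [ofChars_digits p0 hne.1 hC1 (by omega),
                ofChars_digits p1 hne.2.1 hC3.1.1 hC3.1.2,
                ofChars_digits p2 hne.2.2 hC3.2.1 hC3.2.2]
            rw [if_pos ⟨trivial, by simpa [List.isEmpty_iff] using hne⟩]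
            rw [if_pos ⟨trivial, List.length_pos_of_ne_nil hne.2.2,
              by simpa [List.length_pos_iff] using ⟨hne.1, hne.2.1⟩⟩]
            by_cases h1 : (1 ≤ valFrom 0 p0 ∧ valFrom 0 p0 ≤ 31) <;>
              by_cases h2 : (1 ≤ valFrom 0 p1 ∧ valFrom 0 p1 ≤ 12) <;>
              by_cases h3 : (0 ≤ valFrom 0 p2 ∧ valFrom 0 p2 ≤ 99) <;>
              simp [h1, h2, h3]
          · have hA : ¬ (True ∧ ([p0, p1, p2].all fun p => decide ¬p.isEmpty = true) = true) := by
              intro hK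
              exact hne (by simpa [List.isEmpty_iff] using hK.2)
            have hB : ¬ (True ∧ 0 < p2.length ∧
                ([(valFrom 0 p0, 0 + p0.length), (valFrom 0 p1, p1.length)].all
                  fun f => decide (0 < f.2)) = true) := by
              intro hK
              refine hne ⟨?_, ?_, List.ne_nil_of_length_pos hK.2.1⟩ <;>
                [skip; skip] <;> have h0 := hK.2.2 <;>
                simp only [List.all_cons, List.all_nil, Bool.and_eq_true, decide_eq_true_eq,
                  and_true] at h0
              · exact List.ne_nil_of_length_pos (by omega)
              · exact List.ne_nil_of_length_pos (by omega)
            rw [if_neg hA, if_neg hB]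
      · rw [if_neg hC]
        push_neg at hC
        by_cases hl3 : (p0 :: ps).length > 3
        · rw [if_pos hl3]
          rfl
        · rw [if_neg hl3]
          have hcp : ¬ vdCheckParts (p0 :: ps) = true := by
            rw [checkParts_eq]
            simp only [List.all_cons, Bool.and_eq_true, decide_eq_true_eq]
            simp only [List.length_nil, Nat.zero_add] at hC
            simp only [List.length_cons, gt_iff_lt, not_lt] at hl3
            intro hK
            have := hC hK.1.1 (by omega) hK.2
            omega
          rw [if_pos hcp]
          rfl

-- ===== VERDICT (by name: the statement is the Claim_ definition above) =====
theorem validate_date_spec : Claim_equal_validate_date := by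
  intro P _
  exact validate_date_eq_alt P
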